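-- pv_equiv track=rewrite | github.com/giangttbkhn/fake_news_detection_system | local_runner/triples_extraction.py | format_relation
-- ===== SOURCE A (Python) =====
-- def format_relation(str):
--     arr = [pos for pos, char in enumerate(str) if char == " "]
--
--     result = ""
--     for index, item in enumerate(str):
--         if (index - 1) in arr:
--             result += item.upper()
--         else:
--             result += item
--
--     result = result.replace(" ", "")
--
--     return result
-- ===== SOURCE B (Python) =====
-- def format_relation(str):
--     out = []
--     cap = False
--     for ch in str:
--         if ch == " ":
--             cap = True
--         else:
--             out.append(ch.upper() if cap else ch)
--             cap = False
--     return "".join(out)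
-- ===== Notes on version B (the rewrite author's own statement) =====
-- stated objective: faster
-- what changed: Replaced A's three passes (collect space positions, rebuild the string with a linear membership scan per character, then strip spaces) by one left-to-right pass carrying a capitalize-next flag.
import Mathlib
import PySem

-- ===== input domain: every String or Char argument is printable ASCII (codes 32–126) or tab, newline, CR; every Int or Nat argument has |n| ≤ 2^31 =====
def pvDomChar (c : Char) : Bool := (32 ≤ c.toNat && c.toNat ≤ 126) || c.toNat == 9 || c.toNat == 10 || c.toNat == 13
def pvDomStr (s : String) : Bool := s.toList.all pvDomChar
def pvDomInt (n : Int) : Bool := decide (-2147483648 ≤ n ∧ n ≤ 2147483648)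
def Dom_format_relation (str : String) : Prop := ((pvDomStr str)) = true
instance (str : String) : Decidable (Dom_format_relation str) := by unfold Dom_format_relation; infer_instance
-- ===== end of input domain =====

-- B replaces A's three passes (space-position list, per-char membership scan, space strip) by one pass with a capitalize-next flag.


-- ===== PORT A =====
def format_relation (str : String) : String :=
  let arr : List Int :=
    (PySem.List.enumerate str.toList 0).foldl
      (fun acc pc => if pc.2 = ' ' then acc ++ [pc.1] else acc) []
  let result : List Char :=
    (PySem.List.enumerate str.toList 0).foldl
      (fun res pc =>
        if arr.contains (pc.1 - 1) then res ++ PySem.Chars.upper [pc.2]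
        else res ++ [pc.2]) []
  String.mk (PySem.Chars.replace result [' '] [])

-- ===== PORT B =====
def format_relation_alt (str : String) : String :=
  let out :=
    str.toList.foldl
      (fun (st : List Char × Bool) ch =>
        if ch = ' ' then (st.1, true)
        else (st.1 ++ (if st.2 then PySem.Chars.upper [ch] else [ch]), false))
      ([], false)
  String.mk out.1

-- ===== PRECONDITION & SPEC =====
def Spec_format_relation (str : String) (out : String) : Prop := out = format_relation_alt str
instance (str : String) (out : String) : Decidable (Spec_format_relation str out) := by unfold Spec_format_relation; infer_instance

-- ===== CLAIM (what is proved, stated in full; the proofs are below) =====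
def Claim_equal_format_relation : Prop := ∀ (str : String), Dom_format_relation str → Spec_format_relation str (format_relation str)

-- ===== LEMMAS AND PROOFS =====

-- the common specification: one pass carrying a capitalize-next flag
def capSpec : Bool → List Char → List Char
  | _, [] => []
  | cap, c :: r =>
      if c = ' ' then capSpec true r
      else (if cap then PySem.Chars.upperChar c else c) :: capSpec false r

-- the flag that A's membership test "(index - 1) in arr" computes at position k
def capAt (cs : List Char) : Nat → Bool
  | 0 => false
  | j + 1 => cs[j]? == some ' '

-- A's first pass (the space-position list), named for the proofs
def arrA (cs : List Char) : List Int :=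
  (PySem.List.enumerate cs 0).foldl
    (fun acc pc => if pc.2 = ' ' then acc ++ [pc.1] else acc) []

-- A's per-character contribution to `result`
def gA (cs : List Char) (pc : Int × Char) : List Char :=
  if (arrA cs).contains (pc.1 - 1) then PySem.Chars.upper [pc.2] else [pc.2]

lemma foldl_if_append (l : List (Int × Char)) (init : List Int) :
    l.foldl (fun acc pc => if pc.2 = ' ' then acc ++ [pc.1] else acc) init
      = init ++ (l.filter (fun pc => pc.2 = ' ')).map Prod.fst := by
  induction l generalizing init with
  | nil => simp
  | cons p t ih => by_cases h : p.2 = ' ' <;> simp [h, ih]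

lemma mem_arrA (cs : List Char) (j : Int) :
    j ∈ arrA cs ↔ ∃ k : Nat, j = (k : Int) ∧ cs[k]? = some ' ' := by
  unfold arrA
  rw [foldl_if_append]
  simp only [List.nil_append, List.mem_map, List.mem_filter,
    PySem.List.mem_enumerate_iff]
  constructor
  · rintro ⟨p, ⟨⟨k, hk, rfl⟩, hsp⟩, rfl⟩
    refine ⟨k, by simp, ?_⟩
    simp only [decide_eq_true_eq] at hsp
    simp [List.getElem?_eq_getElem hk, hsp]
  · rintro ⟨k, rfl, hk⟩
    have hlt : k < cs.length := by
      by_contra h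
      simp [List.getElem?_eq_none (by omega : cs.length ≤ k)] at hk
    have hck : cs[k] = ' ' := by
      have h := List.getElem?_eq_getElem hlt
      rw [h] at hk; exact Option.some.inj hk
    exact ⟨((0 : Int) + k, cs[k]), ⟨⟨k, hlt, rfl⟩, by simp [hck]⟩, by simp⟩

lemma arrA_contains (cs : List Char) (k : Nat) :
    (arrA cs).contains ((k : Int) - 1) = capAt cs k := by
  cases k with
  | zero =>
    have hnm : ((0 : Nat) : Int) - 1 ∉ arrA cs := by
      rw [mem_arrA]; rintro ⟨m, hm, -⟩; omega
    simp only [capAt]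
    exact Bool.eq_false_iff.mpr (fun h => hnm (List.contains_iff_mem.mp h))
  | succ j =>
    have hc : ((j + 1 : Nat) : Int) - 1 = (j : Int) := by push_cast; ring
    rw [hc, Bool.eq_iff_iff, List.contains_iff_mem, mem_arrA]
    simp only [capAt, beq_iff_eq]
    constructor
    · rintro ⟨m, hm, hsp⟩
      have : m = j := by omega
      subst this; exact hsp
    · intro h; exact ⟨j, rfl, h⟩

lemma resA_eq (l : List (Int × Char)) (cs : List Char) (init : List Char) :
    l.foldl
      (fun res pc =>
        if (arrA cs).contains (pc.1 - 1) then res ++ PySem.Chars.upper [pc.2]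
        else res ++ [pc.2]) init
      = init ++ l.flatMap (gA cs) := by
  induction l generalizing init with
  | nil => simp
  | cons p t ih =>
    rw [List.foldl_cons]
    by_cases h : (arrA cs).contains (p.1 - 1)
    · rw [if_pos h, ih, List.flatMap_cons]
      unfold gA
      rw [if_pos h, List.append_assoc]
    · rw [if_neg h, ih, List.flatMap_cons]
      unfold gA
      rw [if_neg h, List.append_assoc]

lemma replace_go_filter (fuel : Nat) (l acc : List Char) (h : l.length ≤ fuel) :
    PySem.Chars.replace.go [' '] [] fuel l acc
      = acc.reverse ++ l.filter (fun c => c ≠ ' ') := by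
  induction fuel generalizing l acc with
  | zero =>
    have : l = [] := List.length_eq_zero_iff.mp (Nat.le_zero.mp h)
    subst this; simp [PySem.Chars.replace.go]
  | succ n ih =>
    cases l with
    | nil => simp [PySem.Chars.replace.go]
    | cons c t =>
      have ht : t.length ≤ n := by simp at h; omega
      rw [PySem.Chars.replace.go]
      by_cases hc : c = ' '
      · subst hc
        have hpre : [' '].isPrefixOf (' ' :: t) = true :=
          List.isPrefixOf_iff_prefix.mpr (by simp)
        rw [hpre]
        simp only [if_true, List.length_cons, List.length_nil, List.drop_succ_cons,
          List.drop_zero, List.reverse_nil, List.nil_append]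
        rw [ih t _ ht]
        simp
      · have hpre : [' '].isPrefixOf (c :: t) = false := by
          rw [Bool.eq_false_iff]
          intro hp
          obtain ⟨l, hl⟩ := List.isPrefixOf_iff_prefix.mp hp
          exact hc (List.cons.inj hl).1.symm
        rw [hpre]
        simp only [Bool.false_eq_true, if_false]
        rw [ih t _ ht]
        simp [hc]

lemma replace_filter (l : List Char) :
    PySem.Chars.replace l [' '] [] = l.filter (fun c => c ≠ ' ') := by
  rw [PySem.Chars.replace]
  simp only [List.isEmpty_cons, Bool.false_eq_true, if_false]
  exact replace_go_filter l.length l [] le_rfl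

lemma upperChar_space : PySem.Chars.upperChar ' ' = ' ' := by decide

lemma upperChar_ne_space {c : Char} (h : c ≠ ' ') : PySem.Chars.upperChar c ≠ ' ' := by
  unfold PySem.Chars.upperChar
  split
  · rename_i hl
    unfold PySem.Chars.islower at hl
    have h1 : 'a' ≤ c ∧ c ≤ 'z' := by simpa using hl
    have hlo : 97 ≤ c.toNat := by
      have h2 := h1.1
      rw [Char.le_def, UInt32.le_iff_toNat_le] at h2
      exact h2
    have hhi : c.toNat ≤ 122 := by
      have h2 := h1.2
      rw [Char.le_def, UInt32.le_iff_toNat_le] at h2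
      exact h2
    intro heq
    have hnat := congrArg Char.toNat heq
    rw [Char.toNat_ofNat] at hnat
    have hvalid : (c.toNat - 32).isValidChar := by
      unfold Nat.isValidChar
      left; omega
    rw [if_pos hvalid] at hnat
    have hsp : (' ' : Char).toNat = 32 := by decide
    omega
  · exact h

lemma main_A (cs : List Char) :
    ∀ (tail : List Char) (k : Nat), tail = cs.drop k →
    ((PySem.List.enumerate tail (k : Int)).flatMap (gA cs)).filter (fun c => c ≠ ' ')
      = capSpec (capAt cs k) tail := by
  intro tail
  induction tail with
  | nil => intro k _; simp [capSpec]
  | cons c t ih =>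
    intro k hdrop
    have hk : cs[k]? = some c := by
      have h0 : (cs.drop k)[0]? = some c := by rw [← hdrop]; rfl
      rw [List.getElem?_drop] at h0
      simpa using h0
    have ht : t = cs.drop (k + 1) := by
      have h0 : (cs.drop k).drop 1 = cs.drop (k + 1) := by
        rw [List.drop_drop]
      rw [← hdrop] at h0
      simpa using h0
    have hcapsucc : capAt cs (k + 1) = (c == ' ') := by
      simp [capAt, hk]
    rw [PySem.List.enumerate_cons, List.flatMap_cons, List.filter_append]
    have hcast : (k : Int) + 1 = ((k + 1 : Nat) : Int) := by push_cast; ring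
    rw [hcast, ih (k + 1) ht]
    have hgA : gA cs ((k : Int), c)
        = if capAt cs k then [PySem.Chars.upperChar c] else [c] := by
      unfold gA
      rw [arrA_contains]
      simp [PySem.Chars.upper]
    rw [hgA]
    by_cases hc : c = ' '
    · subst hc
      simp only [hcapsucc, BEq.rfl]
      rw [capSpec]
      simp [upperChar_space]
    · have hne : (c == ' ') = false := by simp [hc]
      rw [hcapsucc, hne]
      rw [capSpec]
      simp only [hc, if_false]
      by_cases hcap : capAt cs k
      · simp [hcap, List.filter, upperChar_ne_space hc]
      · simp [hcap, List.filter, hc]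

lemma main_B (cs : List Char) (acc : List Char) (cap : Bool) :
    (cs.foldl
      (fun (st : List Char × Bool) ch =>
        if ch = ' ' then (st.1, true)
        else (st.1 ++ (if st.2 then PySem.Chars.upper [ch] else [ch]), false))
      (acc, cap)).1 = acc ++ capSpec cap cs := by
  induction cs generalizing acc cap with
  | nil => simp [capSpec]
  | cons c t ih =>
    by_cases h : c = ' '
    · subst h
      rw [List.foldl_cons, if_pos rfl, ih]
      simp [capSpec]
    · rw [List.foldl_cons, if_neg h, ih]
      cases cap <;> simp [capSpec, h, PySem.Chars.upper]

-- ===== VERDICT (by name: the statement is the Claim_ definition above) =====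
theorem format_relation_spec : Claim_equal_format_relation := by
  intro s _
  unfold Spec_format_relation
  have hA : format_relation s = String.mk (PySem.Chars.replace
      ((PySem.List.enumerate s.toList 0).foldl
        (fun res pc =>
          if (arrA s.toList).contains (pc.1 - 1) then res ++ PySem.Chars.upper [pc.2]
          else res ++ [pc.2]) []) [' '] []) := rfl
  have hB : format_relation_alt s = String.mk
      ((s.toList.foldl
        (fun (st : List Char × Bool) ch =>
          if ch = ' ' then (st.1, true)
          else (st.1 ++ (if st.2 then PySem.Chars.upper [ch] else [ch]), false))
        ([], false)).1) := rfl
  rw [hA, hB, resA_eq, replace_filter, main_B]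
  have h0 : ((0 : Nat) : Int) = (0 : Int) := rfl
  have := main_A s.toList s.toList 0 (by simp)
  rw [h0] at this
  rw [List.nil_append, this]
  simp [capAt]
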